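-- pv_equiv track=rewrite | github.com/oracle/fastr | com.oracle.truffle.r.test.packages/pkgtest/__init__.py | _parse_runit_result
-- ===== SOURCE A (Python) =====
-- def _parse_runit_result(lines):
--     '''
--     RUNIT TEST PROTOCOL -- Thu Feb 08 10:54:42 2018
--     ***********************************************
--     Number of test functions: 20
--     Number of errors: 0
--     Number of failures: 0
--     '''
--     try:
--         line_idx = next(iter([x for x in enumerate(lines) if 'RUNIT TEST PROTOCOL' in x[1]]))[0]
--         tests_total = 0
--         tests_failed = 0
--         for i in range(line_idx, len(lines)):
--             split_line = lines[i].split(":")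
--             if len(split_line) >= 2:
--                 if "Number of test functions" in split_line[0]:
--                     tests_total = int(split_line[1])
--                 elif "Number of errors" in split_line[0] or "Number of failures" in split_line[0]:
--                     tests_failed = tests_failed + int(split_line[1])
--         return (tests_total - tests_failed, 0, tests_failed)
--     except StopIteration:
--         # That should really not happen since RUnit is detected by a line containing 'RUNIT TEST PROTOCOL'
--         raise TestFrameworkResultException(
--             "Could not parse testthat summary: Line 'RUNIT TEST PROTOCOL' not contained.")
--
-- class TestFrameworkResultException(BaseException):
--     pass
-- ===== SOURCE B (Python) =====
-- class TestFrameworkResultException(BaseException):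
--     pass
--
--
-- def _parse_runit_result(lines):
--     # single pass with a seen-header flag instead of index search + index loop
--     seen = False
--     total = 0
--     failed = 0
--     for line in lines:
--         if not seen:
--             if 'RUNIT TEST PROTOCOL' not in line:
--                 continue
--             seen = True
--         parts = line.split(":")
--         if len(parts) > 1:
--             if "Number of test functions" in parts[0]:
--                 total = int(parts[1])
--             elif "Number of errors" in parts[0] or "Number of failures" in parts[0]:
--                 failed += int(parts[1])
--     if not seen:
--         raise TestFrameworkResultException(
--             "Could not parse testthat summary: Line 'RUNIT TEST PROTOCOL' not contained.")
--     return (total - failed, 0, failed)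
-- ===== Notes on version B (the rewrite author's own statement) =====
-- stated objective: simpler
-- what changed: B replaces A's two-phase enumerate/filter/StopIteration header search followed by an index loop over range(line_idx, len(lines)) with a single linear pass carrying a seen-header flag, raising the same exception at the end if no header line was seen.
import Mathlib
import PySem

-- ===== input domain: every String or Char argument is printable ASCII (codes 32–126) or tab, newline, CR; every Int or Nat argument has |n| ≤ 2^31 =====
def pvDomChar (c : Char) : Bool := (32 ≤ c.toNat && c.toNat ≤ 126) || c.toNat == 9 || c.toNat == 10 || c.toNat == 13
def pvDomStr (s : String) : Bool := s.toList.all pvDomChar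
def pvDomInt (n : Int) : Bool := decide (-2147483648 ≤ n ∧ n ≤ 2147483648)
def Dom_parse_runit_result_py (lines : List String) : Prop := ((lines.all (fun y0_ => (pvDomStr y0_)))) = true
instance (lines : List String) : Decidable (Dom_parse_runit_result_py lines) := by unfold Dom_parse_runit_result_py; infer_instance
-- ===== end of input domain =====

-- B: one linear pass with a seen-header flag instead of A's header-index search plus index loop (simpler decomposition, same cost).


-- ===== PORT A =====
-- per-line body of A's 'for i in range(line_idx, len(lines))' loop; int() ported as
-- PySem.Int.ofStr? with default 0 — ofStr? = none is a Python ValueError, excluded by Pre_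
def pvStepA (acc : Int × Int) (line : String) : Int × Int :=
  match (PySem.Str.split? line ":").getD [] with
  | p0 :: p1 :: _ =>
      if PySem.Str.isIn "Number of test functions" p0 then
        ((PySem.Int.ofStr? p1).getD 0, acc.2)
      else if PySem.Str.isIn "Number of errors" p0 || PySem.Str.isIn "Number of failures" p0 then
        (acc.1, acc.2 + (PySem.Int.ofStr? p1).getD 0)
      else acc
  | _ => acc   -- len(split_line) < 2

def parse_runit_result_py (lines : List String) : Int × Int × Int :=
  match (PySem.List.enumerate lines 0).filter (fun x => PySem.Str.isIn "RUNIT TEST PROTOCOL" x.2) with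
  | [] => (0, 0, 0)   -- StopIteration → Python raises TestFrameworkResultException; excluded by Pre_
  | (line_idx, _) :: _ =>
      let r := (PySem.List.pyRange line_idx (lines.length : Int) 1).foldl
        (fun acc i => pvStepA acc (PySem.List.pyGetD lines i "")) (0, 0)
      (r.1 - r.2, 0, r.2)

-- ===== PORT B =====
-- single pass: 'seen' flag, totals threaded through the recursion (Source B's for-loop)
def pvLoopB : List String → Bool → Int → Int → Bool × Int × Int
  | [], seen, total, failed => (seen, total, failed)
  | line :: rest, seen, total, failed =>
      if !seen && !(PySem.Str.isIn "RUNIT TEST PROTOCOL" line) then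
        pvLoopB rest seen total failed   -- continue
      else
        match (PySem.Str.split? line ":").getD [] with
        | p0 :: p1 :: _ =>
            if PySem.Str.isIn "Number of test functions" p0 then
              pvLoopB rest true ((PySem.Int.ofStr? p1).getD 0) failed
            else if PySem.Str.isIn "Number of errors" p0 || PySem.Str.isIn "Number of failures" p0 then
              pvLoopB rest true total (failed + (PySem.Int.ofStr? p1).getD 0)
            else pvLoopB rest true total failed
        | _ => pvLoopB rest true total failed

def parse_runit_result_py_alt (lines : List String) : Int × Int × Int :=
  match pvLoopB lines false 0 0 with
  | (seen, total, failed) =>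
      if seen then (total - failed, 0, failed)
      else (0, 0, 0)   -- Python raises TestFrameworkResultException here; excluded by Pre_

-- ===== PRECONDITION & SPEC =====
-- a counted line must have an int()-parseable field after the first colon
def pvLineOK (line : String) : Bool :=
  match (PySem.Str.split? line ":").getD [] with
  | p0 :: p1 :: _ =>
      if PySem.Str.isIn "Number of test functions" p0
          || PySem.Str.isIn "Number of errors" p0
          || PySem.Str.isIn "Number of failures" p0 then
        (PySem.Int.ofStr? p1).isSome
      else true
  | _ => true

-- Pre_ excludes exactly the inputs where Python A raises: no header line at all
-- (TestFrameworkResultException), or a counted line at/after the first header whose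
-- field after the colon is not int()-parseable (ValueError). B raises there too.
def Pre_parse_runit_result_py (lines : List String) : Prop :=
  (lines.dropWhile (fun l => !(PySem.Str.isIn "RUNIT TEST PROTOCOL" l)) ≠ []) ∧
  ((lines.dropWhile (fun l => !(PySem.Str.isIn "RUNIT TEST PROTOCOL" l))).all pvLineOK = true)
instance (lines : List String) : Decidable (Pre_parse_runit_result_py lines) := by unfold Pre_parse_runit_result_py; infer_instance

def pvWitness_parse_runit_result_py : List String :=
  ["RUNIT TEST PROTOCOL -- Thu Feb 08 10:54:42 2018",
   "Number of test functions: 20",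
   "Number of errors: 0",
   "Number of failures: 1"]

def Spec_parse_runit_result_py (lines : List String) (out : Int × Int × Int) : Prop := out = parse_runit_result_py_alt lines
instance (lines : List String) (out : Int × Int × Int) : Decidable (Spec_parse_runit_result_py lines out) := by unfold Spec_parse_runit_result_py; infer_instance

-- ===== CLAIM (what is proved, stated in full; the proofs are below) =====
def Claim_equal_parse_runit_result_py : Prop := ∀ (lines : List String), Dom_parse_runit_result_py lines → Pre_parse_runit_result_py lines → Spec_parse_runit_result_py lines (parse_runit_result_py lines)

-- ===== LEMMAS AND PROOFS =====

-- once the header has been seen, B's loop is just a fold of the per-line step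
theorem pvLoopB_true (xs : List String) : ∀ (total failed : Int),
    pvLoopB xs true total failed =
      (true, ((xs.foldl pvStepA (total, failed)).1, (xs.foldl pvStepA (total, failed)).2)) := by
  induction xs with
  | nil => intro total failed; rfl
  | cons l rest ih =>
      intro total failed
      simp only [pvLoopB, Bool.not_true, Bool.false_and, Bool.false_eq_true, if_false,
        List.foldl_cons]
      cases h : (PySem.Str.split? l ":").getD [] with
      | nil => simp [ih, pvStepA, h]
      | cons p0 ps =>
          cases ps with
          | nil => simp [ih, pvStepA, h]
          | cons p1 rest' =>
              simp only [h, pvStepA]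
              split_ifs <;> simp [ih]

theorem pv_enumerate_shift {α : Type} (xs : List α) : ∀ (s : Int),
    PySem.List.enumerate xs s = (PySem.List.enumerate xs 0).map (fun p => (p.1 + s, p.2)) := by
  induction xs with
  | nil => intro s; simp [PySem.List.enumerate_nil]
  | cons x xs ih =>
      intro s
      rw [PySem.List.enumerate_cons, PySem.List.enumerate_cons, ih (s + 1), ih (0 + 1)]
      simp only [List.map_cons, List.map_map]
      refine List.cons_eq_cons.mpr ⟨by simp only [Prod.mk.injEq]; exact ⟨by omega, trivial⟩, ?_⟩
      apply List.map_congr_left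
      intro p _
      show (p.1 + (s + 1), p.2) = (p.1 + 1 + s, p.2)
      exact Prod.ext (by omega) rfl

theorem pv_mem_enumerate_fst_nonneg {α : Type} (xs : List α) :
    ∀ p ∈ PySem.List.enumerate xs 0, 0 ≤ p.1 := by
  intro p hp
  have h1 : p.1 ∈ (PySem.List.enumerate xs 0).map (·.1) := List.mem_map_of_mem hp
  rw [PySem.List.map_fst_enumerate] at h1
  have := (PySem.List.mem_pyRange_one).mp h1
  omega

-- the two ports agree everywhere (outside Pre_ both return the (0,0,0) raise placeholder)
theorem pv_AeqB (lines : List String) :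
    parse_runit_result_py lines = parse_runit_result_py_alt lines := by
  induction lines with
  | nil => rfl
  | cons l rest ih =>
      by_cases hl : PySem.Str.isIn "RUNIT TEST PROTOCOL" l = true
      · -- header found at index 0: A folds over all of l :: rest, B switches the flag on
        unfold parse_runit_result_py parse_runit_result_py_alt
        rw [PySem.List.enumerate_cons]
        simp only [List.filter_cons, hl, if_true]
        rw [PySem.List.foldl_pyRange_zero_pyGetD' (l :: rest) "" pvStepA ((0 : Int), (0 : Int))]
        have hlc : PySem.Chars.isIn ['R', 'U', 'N', 'I', 'T', ' ', 'T', 'E', 'S', 'T', ' ', 'P', 'R', 'O', 'T', 'O', 'C', 'O', 'L'] l.toList = true := hl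
        have hb : pvLoopB (l :: rest) false 0 0 = pvLoopB (l :: rest) true 0 0 := by
          simp [pvLoopB, hlc]
        rw [hb, pvLoopB_true (l :: rest) 0 0]
        simp
      · -- header not in l: A's first match (if any) lies in rest, B skips l
        have hBskip : parse_runit_result_py_alt (l :: rest) = parse_runit_result_py_alt rest := by
          unfold parse_runit_result_py_alt
          have hlc : PySem.Chars.isIn ['R', 'U', 'N', 'I', 'T', ' ', 'T', 'E', 'S', 'T', ' ', 'P', 'R', 'O', 'T', 'O', 'C', 'O', 'L'] l.toList = false :=
            Bool.eq_false_iff.mpr (fun hc => hl hc)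
          have : pvLoopB (l :: rest) false 0 0 = pvLoopB rest false 0 0 := by
            simp [pvLoopB, hlc]
          rw [this]
        rw [hBskip, ← ih]
        unfold parse_runit_result_py
        rw [PySem.List.enumerate_cons]
        simp only [List.filter_cons, hl]
        rw [zero_add, pv_enumerate_shift rest 1, List.filter_map]
        have hpred : ((fun x => PySem.Str.isIn "RUNIT TEST PROTOCOL" x.2) ∘
            (fun p : Int × String => (p.1 + 1, p.2))) =
            (fun x : Int × String => PySem.Str.isIn "RUNIT TEST PROTOCOL" x.2) := by
          funext p; rfl
        rw [hpred]
        cases hE : (PySem.List.enumerate rest 0).filter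
            (fun x => PySem.Str.isIn "RUNIT TEST PROTOCOL" x.2) with
        | nil => rfl
        | cons hd ms =>
            have hi : 0 ≤ hd.1 := by
              apply pv_mem_enumerate_fst_nonneg rest
              exact List.mem_of_mem_filter (hE ▸ List.mem_cons_self)
            obtain ⟨i, x⟩ := hd
            simp only [Bool.false_eq_true, if_false, List.map_cons]
            rw [PySem.List.foldl_pyRange_pyGetD' (l :: rest) "" pvStepA ((0 : Int), (0 : Int))
              (show (0:Int) ≤ i + 1 by omega),
              PySem.List.foldl_pyRange_pyGetD' rest "" pvStepA ((0 : Int), (0 : Int)) hi]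
            have hdrop : (l :: rest).drop (i + 1).toNat = rest.drop i.toNat := by
              have : (i + 1).toNat = i.toNat + 1 := by omega
              rw [this]; rfl
            rw [hdrop]

-- ===== VERDICT (by name: the statement is the Claim_ definition above) =====
theorem parse_runit_result_py_spec : Claim_equal_parse_runit_result_py := by
  intro lines _ _
  unfold Spec_parse_runit_result_py
  exact pv_AeqB lines
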